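-- pv_equiv track=rewrite | github.com/JaeY0ung/Programmers | Level0/유한소수판별하기.py | yaksu
-- ===== SOURCE A (Python) =====
-- def yaksu(a, b):
--     mini = min(a,b)
--     isTrue = True
--     if b == 1 or b == 2:
--         return 1
--     if a == 1:
--         pass
--     elif a == 2:
--         pass
--     for i in range(2, mini + 1):
--         if a % i == 0 and b % i == 0:
--             a = a//i
--             b = b//i
--             isTrue = False
--             return yaksu(a, b)
--     if isTrue == True:
--         return b
-- ===== SOURCE B (Python) =====
-- def yaksu(a, b):
--     if b == 1 or b == 2:
--         return 1
--     if min(a, b) < 2: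
--         return b
--     x, y = a, b
--     while x > 0:
--         x, y = y % x, x
--     d = b // y
--     return 1 if d == 1 or d == 2 else d
-- ===== Notes on version B (the rewrite author's own statement) =====
-- stated objective: faster
-- what changed: Replaces A's recursion that repeatedly strips the smallest common factor found by trial division up to min(a,b) with a single iterative Euclidean-gcd loop followed by one exact division (collapsing quotients 1 and 2 to 1, as A does).
import Mathlib
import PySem

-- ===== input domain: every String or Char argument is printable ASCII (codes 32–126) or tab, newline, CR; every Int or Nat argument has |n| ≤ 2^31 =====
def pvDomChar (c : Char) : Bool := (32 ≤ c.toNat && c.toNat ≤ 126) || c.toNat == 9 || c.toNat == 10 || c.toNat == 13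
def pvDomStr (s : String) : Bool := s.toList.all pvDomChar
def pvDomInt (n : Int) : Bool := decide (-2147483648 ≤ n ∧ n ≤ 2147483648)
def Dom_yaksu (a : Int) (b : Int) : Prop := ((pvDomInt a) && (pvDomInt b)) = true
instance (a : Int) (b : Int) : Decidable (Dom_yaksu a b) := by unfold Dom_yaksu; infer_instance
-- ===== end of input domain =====

-- B replaces A's recursive smallest-common-factor trial division with a single Euclidean-gcd
-- loop followed by one exact division (objective: faster, asymptotically fewer steps).

-- ===== PORT A =====
-- A's for-loop returns at the FIRST i in range(2, min(a,b)+1) dividing both; that first hit: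
def pvFirstFac (a : Int) (b : Int) : Option Int :=
  (PySem.List.pyRange 2 (min a b + 1) 1).find?
    (fun i => decide (PySem.Int.mod a i = 0 ∧ PySem.Int.mod b i = 0))

-- facts about a found factor (needed by yaksu's decreasing_by)
theorem pvFirstFac_some {a b i : Int} (h : pvFirstFac a b = some i) :
    2 ≤ i ∧ i ≤ a ∧ i ≤ b ∧ i ∣ a ∧ i ∣ b := by
  unfold pvFirstFac at h
  have hm := List.mem_of_find?_eq_some h
  have hp := List.find?_some h
  rw [PySem.List.mem_pyRange_one] at hm
  simp only [decide_eq_true_eq] at hp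
  rw [PySem.Int.mod_eq_zero_iff_dvd, PySem.Int.mod_eq_zero_iff_dvd] at hp
  have h1 : i ≤ min a b := by omega
  exact ⟨hm.1, le_trans h1 (min_le_left a b), le_trans h1 (min_le_right a b), hp.1, hp.2⟩

-- the measure b.toNat drops at a recursive call (needed by yaksu's decreasing_by)
theorem pvFirstFac_dec {a b i : Int} (h : pvFirstFac a b = some i)
    (hb : ¬(b = 1 ∨ b = 2)) : (PySem.Int.floordiv b i).toNat < b.toNat := by
  obtain ⟨h2, _, hib, _, hdb⟩ := pvFirstFac_some h
  obtain ⟨c, hc⟩ := hdb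
  have hi : (0 : Int) < i := by omega
  rw [PySem.Int.floordiv_eq_ediv_of_pos hi, hc,
    Int.mul_ediv_cancel_left c (ne_of_gt hi)]
  have hb3 : (3 : Int) ≤ b := by omega
  have hmul : (0 : Int) < i * c := by omega
  have hc1 : (0 : Int) < c := by
    rcases mul_pos_iff.mp hmul with ⟨_, hcpos⟩ | ⟨hineg, _⟩
    · exact hcpos
    · omega
  have h2c : 2 * c ≤ i * c := mul_le_mul_of_nonneg_right h2 (le_of_lt hc1)
  omega

def yaksu (a : Int) (b : Int) : Int :=
  if hb : b = 1 ∨ b = 2 then 1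
  else
    match h : pvFirstFac a b with
    | some i => yaksu (PySem.Int.floordiv a i) (PySem.Int.floordiv b i)
    | none => b
termination_by b.toNat
decreasing_by exact pvFirstFac_dec h hb

-- ===== PORT B =====
-- the while-loop 'while x > 0: x, y = y % x, x' of Source B
def pvEuclid (x : Int) (y : Int) : Int :=
  if h : 0 < x then pvEuclid (PySem.Int.mod y x) x else y
termination_by x.toNat
decreasing_by
  have h1 := PySem.Int.mod_nonneg y h
  have h2 := PySem.Int.mod_lt y h
  omega

def yaksu_alt (a : Int) (b : Int) : Int :=
  if b = 1 ∨ b = 2 then 1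
  else if min a b < 2 then b
  else
    let y := pvEuclid a b
    let d := PySem.Int.floordiv b y
    if d = 1 ∨ d = 2 then 1 else d

-- ===== PRECONDITION & SPEC =====
def Spec_yaksu (a : Int) (b : Int) (out : Int) : Prop := out = yaksu_alt a b
instance (a : Int) (b : Int) (out : Int) : Decidable (Spec_yaksu a b out) := by unfold Spec_yaksu; infer_instance

-- ===== CLAIM (what is proved, stated in full; the proofs are below) =====
def Claim_equal_yaksu : Prop := ∀ (a : Int) (b : Int), Dom_yaksu a b → Spec_yaksu a b (yaksu a b)

-- ===== LEMMAS AND PROOFS =====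

-- the common target value: b divided by gcd(a,b), collapsed to 1 when that quotient is 1 or 2
def pvRed (a : Int) (b : Int) : Int :=
  let d := b / (Int.gcd a b : Int)
  if d = 1 ∨ d = 2 then 1 else d

theorem pv_gcd_step (x y : Int) (hx : 0 < x) (hy : 0 ≤ y) :
    Int.gcd (y % x) x = Int.gcd x y := by
  unfold Int.gcd
  have habs : (y % x).natAbs = y.natAbs % x.natAbs := by
    rw [Int.natAbs_emod y (ne_of_gt hx)]
    simp [hy]
  rw [habs]
  exact (Nat.gcd_rec x.natAbs y.natAbs).symm

theorem pvEuclid_eq_gcd : ∀ (n : ℕ) (x y : Int), x.toNat ≤ n → 0 ≤ x → 0 ≤ y →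
    pvEuclid x y = (Int.gcd x y : Int) := by
  intro n
  induction n with
  | zero =>
    intro x y hn hx hy
    have hx0 : x = 0 := by omega
    subst hx0
    rw [pvEuclid]
    simp [Int.natAbs_of_nonneg hy]
  | succ n ih =>
    intro x y hn hx hy
    by_cases h : 0 < x
    · rw [pvEuclid, dif_pos h, PySem.Int.mod_eq_emod_of_pos h]
      have hm1 : 0 ≤ y % x := Int.emod_nonneg y (ne_of_gt h)
      have hm2 : y % x < x := Int.emod_lt_of_pos y h
      rw [ih (y % x) x (by omega) hm1 (le_of_lt h)]
      exact_mod_cast congrArg (fun k : ℕ => (k : Int)) (pv_gcd_step x y h hy)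
    · have hx0 : x = 0 := by omega
      subst hx0
      rw [pvEuclid]
      simp [Int.natAbs_of_nonneg hy]

theorem pv_pos_right {p q : Int} (hp : 0 < p) (hpq : 0 < p * q) : 0 < q := by
  rcases mul_pos_iff.mp hpq with ⟨_, h⟩ | ⟨h, _⟩
  · exact h
  · omega

theorem yaksu_red : ∀ (n : ℕ) (a b : Int), b.toNat ≤ n → 1 ≤ a → 3 ≤ b →
    yaksu a b = pvRed a b := by
  intro n
  induction n with
  | zero => intro a b hn ha hb; omega
  | succ n ih =>
    intro a b hn ha hb
    have hbne : ¬(b = 1 ∨ b = 2) := by omega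
    rw [yaksu, dif_neg hbne]
    split
    case h_1 i heq =>
      obtain ⟨h2, hia, hib, hda, hdb⟩ := pvFirstFac_some heq
      obtain ⟨ca, hca⟩ := hda
      obtain ⟨cb, hcb⟩ := hdb
      have hi : (0 : Int) < i := by omega
      have hca1 : 0 < ca := pv_pos_right hi (by omega)
      have hcb1 : 0 < cb := pv_pos_right hi (by omega)
      have h2cb : 2 * cb ≤ i * cb := mul_le_mul_of_nonneg_right h2 (le_of_lt hcb1)
      have hcb_lt : cb < b := by omega
      have hfa : PySem.Int.floordiv a i = ca := by
        rw [PySem.Int.floordiv_eq_ediv_of_pos hi, hca,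
          Int.mul_ediv_cancel_left ca (ne_of_gt hi)]
      have hfb : PySem.Int.floordiv b i = cb := by
        rw [PySem.Int.floordiv_eq_ediv_of_pos hi, hcb,
          Int.mul_ediv_cancel_left cb (ne_of_gt hi)]
      rw [hfa, hfb]
      have hred : pvRed a b = pvRed ca cb := by
        unfold pvRed
        have hgm : Int.gcd a b = i.natAbs * Int.gcd ca cb := by
          rw [hca, hcb]; exact Int.gcd_mul_left i ca cb
        have hcast : ((Int.gcd a b : ℕ) : Int) = i * (Int.gcd ca cb : Int) := by
          rw [hgm]; push_cast [Int.natAbs_of_nonneg (le_of_lt hi)]; ring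
        rw [hcast, hcb, Int.mul_ediv_mul_of_pos cb (Int.gcd ca cb : Int) hi]
      rw [hred]
      by_cases hcb3 : 3 ≤ cb
      · exact ih ca cb (by omega) (by omega) hcb3
      · have hcb12 : cb = 1 ∨ cb = 2 := by omega
        rw [yaksu, dif_pos hcb12]
        unfold pvRed
        have hgd : ((Int.gcd ca cb : ℕ) : Int) ∣ cb := Int.gcd_dvd_right ca cb
        have hgpos : 0 < Int.gcd ca cb := by
          rw [Int.gcd_pos_iff]; right; omega
        set g : Int := ((Int.gcd ca cb : ℕ) : Int) with hgdef
        have hg1 : (1 : Int) ≤ g := by rw [hgdef]; exact_mod_cast hgpos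
        obtain ⟨e, he⟩ := hgd
        have hde : cb / g = e := by
          rw [he]; exact Int.mul_ediv_cancel_left e (by omega)
        have he1 : 0 < e := pv_pos_right (by omega) (he ▸ hcb1)
        have h1e : 1 * e ≤ g * e := mul_le_mul_of_nonneg_right hg1 (le_of_lt he1)
        simp only [hde]
        rw [if_pos (by omega : e = 1 ∨ e = 2)]
    case h_2 heq =>
      have hnone := List.find?_eq_none.mp (by unfold pvFirstFac at heq; exact heq)
      have hga : ((Int.gcd a b : ℕ) : Int) ∣ a := Int.gcd_dvd_left a b
      have hgb : ((Int.gcd a b : ℕ) : Int) ∣ b := Int.gcd_dvd_right a b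
      have hgla : ((Int.gcd a b : ℕ) : Int) ≤ a := Int.le_of_dvd (by omega) hga
      have hglb : ((Int.gcd a b : ℕ) : Int) ≤ b := Int.le_of_dvd (by omega) hgb
      have hgpos : 0 < Int.gcd a b := by rw [Int.gcd_pos_iff]; right; omega
      have hg1 : (1 : Int) ≤ (Int.gcd a b : Int) := by exact_mod_cast hgpos
      have hgeq1 : ((Int.gcd a b : ℕ) : Int) = 1 := by
        by_contra hne
        have h2g : (2 : Int) ≤ (Int.gcd a b : Int) := by omega
        have hmem : ((Int.gcd a b : ℕ) : Int) ∈ PySem.List.pyRange 2 (min a b + 1) 1 := by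
          rw [PySem.List.mem_pyRange_one]
          constructor
          · exact h2g
          · have : ((Int.gcd a b : ℕ) : Int) ≤ min a b := le_min hgla hglb
            omega
        have := hnone _ hmem
        simp only [decide_eq_true_eq] at this
        exact this ⟨(PySem.Int.mod_eq_zero_iff_dvd a _).mpr hga,
          (PySem.Int.mod_eq_zero_iff_dvd b _).mpr hgb⟩
      unfold pvRed
      rw [hgeq1, Int.ediv_one, if_neg (by omega)]

-- ===== VERDICT (by name: the statement is the Claim_ definition above) =====
theorem yaksu_spec : Claim_equal_yaksu := by
  unfold Claim_equal_yaksu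
  intro a b _
  unfold Spec_yaksu yaksu_alt
  by_cases hb : b = 1 ∨ b = 2
  · rw [yaksu, dif_pos hb, if_pos hb]
  · rw [if_neg hb]
    by_cases hmin : min a b < 2
    · rw [if_pos hmin]
      have hnone : pvFirstFac a b = none := by
        unfold pvFirstFac
        rw [PySem.List.pyRange_one_eq_nil (by omega)]
        rfl
      rw [yaksu, dif_neg hb]
      split
      case h_1 i heq => rw [hnone] at heq; exact absurd heq (by simp)
      case h_2 => rfl
    · rw [if_neg hmin]
      have hmin2 : 2 ≤ min a b := by omega
      have ha2 : 2 ≤ a := le_trans hmin2 (min_le_left a b)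
      have hb2 : 2 ≤ b := le_trans hmin2 (min_le_right a b)
      have hb3 : 3 ≤ b := by omega
      rw [yaksu_red b.toNat a b le_rfl (by omega) hb3]
      rw [pvEuclid_eq_gcd a.toNat a b le_rfl (by omega) (by omega)]
      have hgpos : 0 < Int.gcd a b := by rw [Int.gcd_pos_iff]; right; omega
      have hg0 : (0 : Int) < (Int.gcd a b : Int) := by exact_mod_cast hgpos
      unfold pvRed
      simp only [PySem.Int.floordiv_eq_ediv_of_pos hg0]
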